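-- pv_equiv track=rewrite | github.com/nortikin/sverchok | utils/mesh_structure/visualize.py | generate_unique_edges_from_faces
-- ===== SOURCE A (Python) =====
-- from itertools import cycle, chain, count, accumulate
-- from typing import List, Tuple, Union, Type, Iterable
--
-- def generate_unique_edges_from_faces(faces: List[List[int]]) -> dict:
--     edge_index = dict()
--     counter = count()
--     for f in faces:
--         for e in edge_list(f):
--             if e not in edge_index:
--                 edge_index[e] = next(counter)
--     return edge_index
--
-- def edge_list(face: List[int]) -> Tuple[int]:
--     for i1, i2 in zip(face, face[1:] + face[:1]):
--         yield tuple(sorted([i1, i2]))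
-- ===== SOURCE B (Python) =====
-- def generate_unique_edges_from_faces(faces):
--     # Flatten all cyclic face edges into one positioned stream, recover each
--     # edge's first-occurrence position by a single reversed overwrite scan
--     # (the last write wins, i.e. the smallest position), then sort the edges
--     # by that position and enumerate them.
--     stream = [tuple(sorted(p)) for f in faces for p in zip(f, f[1:] + f[:1])]
--     first = {}
--     for pos, e in reversed(list(enumerate(stream))):
--         first[e] = pos
--     order = sorted(first, key=first.get)
--     return {e: i for i, e in enumerate(order)}
-- ===== Notes on version B (the rewrite author's own statement) =====
-- stated objective: alternative
-- what changed: Replaced A's incremental membership-test-plus-counter dict loop by a positional algorithm: flatten all edges into one positioned stream, recover each edge's first-occurrence position with a single reversed overwrite scan (no membership test), sort the edges by that position, and enumerate.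
import Mathlib
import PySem

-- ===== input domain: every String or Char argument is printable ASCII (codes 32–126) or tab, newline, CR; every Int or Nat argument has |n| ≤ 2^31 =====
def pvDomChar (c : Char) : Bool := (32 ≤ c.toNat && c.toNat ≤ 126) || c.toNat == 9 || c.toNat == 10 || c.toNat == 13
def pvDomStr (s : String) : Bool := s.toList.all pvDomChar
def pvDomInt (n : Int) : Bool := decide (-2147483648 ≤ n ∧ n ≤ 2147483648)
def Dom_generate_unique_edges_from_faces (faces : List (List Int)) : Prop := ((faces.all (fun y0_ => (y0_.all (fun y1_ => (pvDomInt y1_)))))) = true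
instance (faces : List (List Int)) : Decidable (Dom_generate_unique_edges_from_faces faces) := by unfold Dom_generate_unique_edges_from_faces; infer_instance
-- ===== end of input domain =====

-- B replaces A's incremental membership-test-plus-counter loop by a positional
-- algorithm: flatten all edges into one positioned stream, recover each edge's
-- first-occurrence position by a reversed overwrite scan, sort by that position,
-- then enumerate. Alternative decomposition; same result, no speed claim.

-- ===== PORT A =====
-- tuple(sorted([i1, i2]))
def pvSortedPair (a b : Int) : Int × Int := if a ≤ b then (a, b) else (b, a)

-- edge_list(face): zip(face, face[1:] + face[:1]); nonnegative slices f[1:] / f[:1] are drop 1 / take 1 exactly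
def edge_list (face : List Int) : List (Int × Int) :=
  (face.zip (face.drop 1 ++ face.take 1)).map (fun p => pvSortedPair p.1 p.2)

-- A: dict + itertools.count, insert only unseen edges; the dict is returned as its items, flattened to triples
def generate_unique_edges_from_faces (faces : List (List Int)) : List (Int × Int × Int) :=
  let st := faces.foldl
      (fun (st : PySem.Dict (Int × Int) Int × Int) f =>
        (edge_list f).foldl
          (fun st e => if st.1.contains e then st else (st.1.insert e st.2, st.2 + 1)) st)
      (PySem.Dict.empty, 0)
  st.1.items.map (fun p => (p.1.1, p.1.2, p.2))

-- ===== PORT B =====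
-- stream = [tuple(sorted(p)) for f in faces for p in zip(f, f[1:] + f[:1])]
def edge_stream (faces : List (List Int)) : List (Int × Int) :=
  faces.flatMap (fun f =>
    (f.zip (f.drop 1 ++ f.take 1)).map (fun p => if p.1 ≤ p.2 then (p.1, p.2) else (p.2, p.1)))

-- B: reversed overwrite scan over enumerate(stream) (last write = first occurrence),
-- sort the dict's keys by stored position, then enumerate
def generate_unique_edges_from_faces_alt (faces : List (List Int)) : List (Int × Int × Int) :=
  let stream := edge_stream faces
  let first := (PySem.List.enumerate stream 0).reverse.foldl
      (fun (d : PySem.Dict (Int × Int) Int) p => d.insert p.2 p.1) PySem.Dict.empty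
  let order := PySem.List.sorted first.keys (fun e => first.getD e 0) false
  (PySem.List.enumerate order 0).map (fun p => (p.2.1, p.2.2, p.1))

-- ===== PRECONDITION & SPEC =====
def Spec_generate_unique_edges_from_faces (faces : List (List Int)) (out : List (Int × Int × Int)) : Prop := out = generate_unique_edges_from_faces_alt faces
instance (faces : List (List Int)) (out : List (Int × Int × Int)) : Decidable (Spec_generate_unique_edges_from_faces faces out) := by unfold Spec_generate_unique_edges_from_faces; infer_instance

-- ===== CLAIM (what is proved, stated in full; the proofs are below) =====
def Claim_equal_generate_unique_edges_from_faces : Prop := ∀ (faces : List (List Int)), Dom_generate_unique_edges_from_faces faces → Spec_generate_unique_edges_from_faces faces (generate_unique_edges_from_faces faces)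

-- ===== LEMMAS AND PROOFS =====

-- A's step on one edge
def pvStep (st : PySem.Dict (Int × Int) Int × Int) (e : Int × Int) : PySem.Dict (Int × Int) Int × Int :=
  if st.1.contains e then st else (st.1.insert e st.2, st.2 + 1)

lemma pv_nested_eq_flat (faces : List (List Int)) (init : PySem.Dict (Int × Int) Int × Int) :
    faces.foldl (fun st f => (edge_list f).foldl pvStep st) init
      = (faces.flatMap edge_list).foldl pvStep init := by
  induction faces generalizing init with
  | nil => rfl
  | cons f fs ih => simp [List.flatMap_cons, List.foldl_append, ih]

lemma pv_edge_stream_eq (faces : List (List Int)) :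
    edge_stream faces = faces.flatMap edge_list := by
  unfold edge_stream edge_list pvSortedPair
  rfl

-- A's loop invariant: the dict enumerates the distinct edges seen so far, in order
lemma pv_loop (s : List (Int × Int)) :
    ∀ (d : PySem.Dict (Int × Int) Int) (u : List (Int × Int)),
      d.items = (PySem.List.enumerate u 0).map (fun p => (p.2, p.1)) →
      d.keys = u → u.Nodup →
      (s.foldl pvStep (d, (u.length : Int))).1.items
        = (PySem.List.enumerate (PySem.Set.update u s) 0).map (fun p => (p.2, p.1)) := by
  induction s with
  | nil => intro d u hi hk _; simp [PySem.Set.update, hi]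
  | cons e s ih =>
    intro d u hi hk hn
    have hcont : d.contains e = decide (e ∈ u) := by
      simp [PySem.Dict.contains_eq_decide_mem_keys, hk]
    by_cases hm : e ∈ u
    · have hadd : PySem.Set.add u e = u := by simp [PySem.Set.add, PySem.Set.contains, hm]
      simp only [List.foldl_cons, pvStep, hcont, hm, decide_true, if_true,
        PySem.Set.update_cons, hadd]
      exact ih d u hi hk hn
    · have hadd : PySem.Set.add u e = u ++ [e] := by
        simp [PySem.Set.add, PySem.Set.contains, hm]
      have hc' : d.contains e = false := by simp [hcont, hm]
      have hi' : (d.insert e (u.length : Int)).items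
          = (PySem.List.enumerate (u ++ [e]) 0).map (fun p => (p.2, p.1)) := by
        rw [PySem.Dict.items_insert_of_not_contains _ _ hc', hi,
          PySem.List.enumerate_append]
        simp [PySem.List.enumerate]
      have hk' : (d.insert e (u.length : Int)).keys = u ++ [e] := by
        rw [PySem.Dict.keys_insert_of_not_contains _ _ hc', hk]
      have hn' : (u ++ [e]).Nodup := by
        simp [List.nodup_append, hn]
        intro a b hab heq
        exact hm (heq ▸ hab)
      have hlen : (u.length : Int) + 1 = ((u ++ [e]).length : Int) := by
        simp
      simp only [List.foldl_cons, pvStep, hc', Bool.false_eq_true, if_false,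
        PySem.Set.update_cons, hadd, hlen]
      exact ih _ _ hi' hk' hn'

-- B-side: value stored by the reversed overwrite scan = first pair in enumerate with that key
lemma pv_getD_foldr_insert (l : List (Int × (Int × Int))) (e : Int × Int) :
    (l.foldr (fun p (d : PySem.Dict (Int × Int) Int) => d.insert p.2 p.1)
        PySem.Dict.empty).getD e 0
      = match l.find? (fun p => p.2 == e) with
        | some p => p.1
        | none => 0 := by
  induction l with
  | nil => simp [PySem.Dict.getD_empty]
  | cons p l ih =>
    simp only [List.foldr_cons, List.find?_cons, PySem.Dict.getD_insert]
    by_cases h : p.2 = e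
    · simp [h]
    · have hb : (p.2 == e) = false := by simp [h]
      have h' : ¬ e = p.2 := fun hc => h (Eq.symm hc)
      simp [hb, h', ih]

-- first matching pair in enumerate s is at the first occurrence index
lemma pv_find_enumerate (s : List (Int × Int)) (e : Int × Int) (he : e ∈ s) :
    ∀ (k : Int), (PySem.List.enumerate s k).find? (fun p => p.2 == e)
      = some (k + (s.idxOf e : Int), e) := by
  induction s with
  | nil => cases he
  | cons x s ih =>
    intro k
    by_cases h : x = e
    · subst h
      simp [PySem.List.enumerate_cons, List.idxOf_cons_self]
    · have hb : (x == e) = false := by simp [h]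
      have he' : e ∈ s := by cases he with
        | head => exact absurd rfl h
        | tail _ h' => exact h'
      have hidx : (x :: s).idxOf e = s.idxOf e + 1 := by
        simp [h]
      rw [PySem.List.enumerate_cons]
      simp only [List.find?_cons, hb]
      rw [ih he' (k + 1), hidx]
      congr 2
      push_cast
      ring

-- first-occurrence indices strictly increase along PySem.List.dedup
lemma pv_pairwise_idxOf_dedup (s : List (Int × Int)) :
    (PySem.List.dedup s).Pairwise (fun a b => s.idxOf a < s.idxOf b) := by
  induction s with
  | nil => simp [PySem.List.dedup]
  | cons x s ih =>
    rw [PySem.List.dedup_eq_ofList, PySem.Set.ofList_cons]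
    constructor
    · intro b hb
      have hbm := (PySem.Set.mem_discard _ _ _).mp hb
      have hbne : b ≠ x := hbm.2
      rw [List.idxOf_cons_self]
      rw [List.idxOf_cons_ne _ (fun hc => hbne hc.symm)]
      omega
    · have hsub : (PySem.Set.discard (PySem.Set.ofList s) x).Sublist (PySem.Set.ofList s) := by
        simp [PySem.Set.discard]
      have hp : (PySem.Set.ofList s).Pairwise (fun a b => s.idxOf a < s.idxOf b) := by
        rw [← PySem.List.dedup_eq_ofList]; exact ih
      have hp' := hp.sublist hsub
      refine hp'.imp_of_mem ?_
      intro a b ha hb hlt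
      have hane : a ≠ x := ((PySem.Set.mem_discard _ _ _).mp ha).2
      have hbne : b ≠ x := ((PySem.Set.mem_discard _ _ _).mp hb).2
      rw [List.idxOf_cons_ne _ (fun hc => hane hc.symm),
        List.idxOf_cons_ne _ (fun hc => hbne hc.symm)]
      omega

-- the keys of B's dict and the stored values
lemma pv_first_keys (s : List (Int × Int)) :
    ((PySem.List.enumerate s 0).reverse.foldl
        (fun (d : PySem.Dict (Int × Int) Int) p => d.insert p.2 p.1)
        PySem.Dict.empty).keys
      = PySem.Set.ofList s.reverse := by
  rw [PySem.Dict.keys_foldl_insert_key]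
  have : ((PySem.List.enumerate s 0).reverse.map (fun p => p.2)) = s.reverse := by
    rw [List.map_reverse, PySem.List.map_snd_enumerate]
  rw [this]
  simp [PySem.Dict.keys_empty, PySem.Set.update_nil_left]

lemma pv_first_getD (s : List (Int × Int)) (e : Int × Int) (he : e ∈ s) :
    ((PySem.List.enumerate s 0).reverse.foldl
        (fun (d : PySem.Dict (Int × Int) Int) p => d.insert p.2 p.1)
        PySem.Dict.empty).getD e 0
      = (s.idxOf e : Int) := by
  rw [List.foldl_reverse]
  have := pv_getD_foldr_insert (PySem.List.enumerate s 0) e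
  rw [this, pv_find_enumerate s e he 0]
  simp

-- B's sorted key list is the first-seen dedup of the stream
lemma pv_order_eq_dedup (s : List (Int × Int)) :
    PySem.List.sorted
      ((PySem.List.enumerate s 0).reverse.foldl
          (fun (d : PySem.Dict (Int × Int) Int) p => d.insert p.2 p.1)
          PySem.Dict.empty).keys
      (fun e => ((PySem.List.enumerate s 0).reverse.foldl
          (fun (d : PySem.Dict (Int × Int) Int) p => d.insert p.2 p.1)
          PySem.Dict.empty).getD e 0) false
      = PySem.List.dedup s := by
  apply PySem.List.sorted_eq_of_perm_of_pairwise_lt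
  · -- dedup s is a permutation of the keys
    rw [pv_first_keys]
    apply (List.perm_ext_iff_of_nodup (PySem.List.nodup_dedup s) (PySem.Set.nodup_ofList _)).mpr
    intro a
    rw [PySem.List.mem_dedup, PySem.Set.mem_ofList, List.mem_reverse]
  · -- keys strictly increase under the stored first positions
    refine (pv_pairwise_idxOf_dedup s).imp_of_mem ?_
    intro a b ha hb hlt
    have ha' : a ∈ s := (PySem.List.mem_dedup _ _).mp ha
    have hb' : b ∈ s := (PySem.List.mem_dedup _ _).mp hb
    rw [pv_first_getD s a ha', pv_first_getD s b hb']
    exact_mod_cast hlt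

-- ===== VERDICT (by name: the statement is the Claim_ definition above) =====
theorem generate_unique_edges_from_faces_spec : Claim_equal_generate_unique_edges_from_faces := by
  intro faces _
  show _ = _
  unfold generate_unique_edges_from_faces generate_unique_edges_from_faces_alt
  have h0 : (PySem.Dict.empty : PySem.Dict (Int × Int) Int).items
      = (PySem.List.enumerate ([] : List (Int × Int)) 0).map (fun p => (p.2, p.1)) := by
    simp [PySem.Dict.empty, PySem.List.enumerate]
  have h := pv_loop (faces.flatMap edge_list) PySem.Dict.empty [] h0
    (by simp [PySem.Dict.empty, PySem.Dict.keys]) List.nodup_nil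
  have hfold : faces.foldl
      (fun st f => (edge_list f).foldl
        (fun st e => if st.1.contains e then st else (st.1.insert e st.2, st.2 + 1)) st)
      (PySem.Dict.empty, 0)
      = (faces.flatMap edge_list).foldl pvStep (PySem.Dict.empty, (0 : Int)) := by
    rw [← pv_nested_eq_flat]; rfl
  simp only [List.length_nil, Nat.cast_zero] at h
  simp only [hfold, h]
  rw [pv_order_eq_dedup (edge_stream faces), pv_edge_stream_eq,
    PySem.List.dedup_eq_ofList, ← PySem.Set.update_nil_left]
  simp [List.map_map, Function.comp]
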